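-- pv_equiv track=rewrite | github.com/tunxu/digitale-bildverarbeitung | ExerciseApp/source/HistogramManipulation.py | findMinMaxPos
-- ===== SOURCE A (Python) =====
-- def findMinMaxPos(histogram):
--     minPos = 0
--     maxPos = 255
--
--     # erstes Histogramm-Bin > 0
--     for i in range(len(histogram)):
--         if histogram[i] > 0:
--             minPos = i
--             break
--
--     # letztes Histogramm-Bin > 0
--     for i in range(len(histogram) - 1, -1, -1):
--         if histogram[i] > 0:
--             maxPos = i
--             break
--
--     return minPos, maxPos
-- ===== SOURCE B (Python) =====
-- def findMinMaxPos(histogram):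
--     minPos = 0
--     maxPos = 255
--     found = False
--     for i, v in enumerate(histogram):
--         if v > 0:
--             if not found:
--                 minPos = i
--                 found = True
--             maxPos = i
--     return minPos, maxPos
-- ===== Notes on version B (the rewrite author's own statement) =====
-- stated objective: alternative
-- what changed: Replaces A's two end-anchored break-scans (forward for the first positive bin, backward for the last) by a single forward pass that maintains first/last positive markers with a found flag.
import Mathlib
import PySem

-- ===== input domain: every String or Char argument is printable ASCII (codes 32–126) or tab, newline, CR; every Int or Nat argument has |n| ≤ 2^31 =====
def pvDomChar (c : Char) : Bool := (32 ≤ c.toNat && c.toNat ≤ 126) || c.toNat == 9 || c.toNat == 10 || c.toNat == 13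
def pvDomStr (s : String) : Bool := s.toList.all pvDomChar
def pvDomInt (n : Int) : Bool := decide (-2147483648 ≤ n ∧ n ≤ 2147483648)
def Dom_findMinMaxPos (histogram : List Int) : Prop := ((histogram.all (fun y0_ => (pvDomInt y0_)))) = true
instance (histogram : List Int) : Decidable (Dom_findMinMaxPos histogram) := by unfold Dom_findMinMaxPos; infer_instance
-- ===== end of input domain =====

-- B is an alternative single forward pass keeping first/last positive markers; same result as A's two break-scans, same cost.

-- ===== PORT A =====
-- forward loop 'for i in range(len(histogram)): if histogram[i] > 0: minPos = i; break'
-- (structural recursion over the suffix, i the current index; histogram[i] is the head)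
def findMinMaxPosLoop1 : List Int → Int → Int
  | [], _ => 0
  | x :: rest, i => if x > 0 then i else findMinMaxPosLoop1 rest (i + 1)

-- backward loop 'for i in range(len(histogram)-1, -1, -1): if histogram[i] > 0: maxPos = i; break'
-- (iterated over the reversed list, i counting down from len-1)
def findMinMaxPosLoop2 : List Int → Int → Int
  | [], _ => 255
  | x :: rest, i => if x > 0 then i else findMinMaxPosLoop2 rest (i - 1)

def findMinMaxPos (histogram : List Int) : Int × Int :=
  (findMinMaxPosLoop1 histogram 0,
   findMinMaxPosLoop2 histogram.reverse ((histogram.length : Int) - 1))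

-- ===== PORT B =====
-- single forward pass: state (found, minPos, maxPos)
def findMinMaxPosAltGo : List Int → Int → Bool × Int × Int → Bool × Int × Int
  | [], _, st => st
  | v :: rest, i, (found, mn, mx) =>
      if v > 0 then
        findMinMaxPosAltGo rest (i + 1) (true, if found then mn else i, i)
      else
        findMinMaxPosAltGo rest (i + 1) (found, mn, mx)

def findMinMaxPos_alt (histogram : List Int) : Int × Int :=
  (findMinMaxPosAltGo histogram 0 (false, 0, 255)).2

-- ===== PRECONDITION & SPEC =====
def Spec_findMinMaxPos (histogram : List Int) (out : Int × Int) : Prop := out = findMinMaxPos_alt histogram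
instance (histogram : List Int) (out : Int × Int) : Decidable (Spec_findMinMaxPos histogram out) := by unfold Spec_findMinMaxPos; infer_instance

-- ===== CLAIM (what is proved, stated in full; the proofs are below) =====
def Claim_equal_findMinMaxPos : Prop := ∀ (histogram : List Int), Dom_findMinMaxPos histogram → Spec_findMinMaxPos histogram (findMinMaxPos histogram)

-- ===== LEMMAS AND PROOFS =====

-- forward "last positive" tracker, the common reference for both maxPos computations
def pvLastAux : List Int → Int → Int → Int
  | [], _, d => d
  | v :: rest, i, d => pvLastAux rest (i + 1) (if v > 0 then i else d)

theorem pvLastAux_append (l : List Int) (x : Int) (i d : Int) :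
    pvLastAux (l ++ [x]) i d
      = (if x > 0 then i + (l.length : Int) else pvLastAux l i d) := by
  induction l generalizing i d with
  | nil => simp [pvLastAux]
  | cons y ys ih =>
      simp only [List.cons_append, pvLastAux, ih, List.length_cons]
      split_ifs <;> push_cast <;> ring_nf

theorem loop2_eq_lastAux (l : List Int) (i : Int) :
    findMinMaxPosLoop2 l.reverse (i + (l.length : Int) - 1) = pvLastAux l i 255 := by
  induction l using List.reverseRecOn generalizing i with
  | nil => simp [findMinMaxPosLoop2, pvLastAux]
  | append_singleton ys x ih =>
      rw [pvLastAux_append]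
      simp only [List.reverse_append, List.reverse_singleton, List.singleton_append,
        List.length_append, List.length_singleton, findMinMaxPosLoop2]
      have h1 : i + ((ys.length + 1 : Nat) : Int) - 1 = i + (ys.length : Int) := by
        push_cast; ring
      rw [h1, ih]

theorem altGo_true (l : List Int) (i mn mx : Int) :
    findMinMaxPosAltGo l i (true, mn, mx) = (true, mn, pvLastAux l i mx) := by
  induction l generalizing i mx with
  | nil => simp [findMinMaxPosAltGo, pvLastAux]
  | cons v rest ih =>
      simp only [findMinMaxPosAltGo, pvLastAux]
      split_ifs with h <;> simp [ih]

theorem altGo_false (l : List Int) (i mx : Int) :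
    (findMinMaxPosAltGo l i (false, 0, mx)).2
      = (findMinMaxPosLoop1 l i, pvLastAux l i mx) := by
  induction l generalizing i mx with
  | nil => simp [findMinMaxPosAltGo, findMinMaxPosLoop1, pvLastAux]
  | cons v rest ih =>
      by_cases h : v > 0
      · simp only [findMinMaxPosAltGo, findMinMaxPosLoop1, pvLastAux, if_pos h, altGo_true]
        simp
      · simp only [findMinMaxPosAltGo, findMinMaxPosLoop1, pvLastAux, if_neg h]
        exact ih _ _

-- ===== VERDICT (by name: the statement is the Claim_ definition above) =====
theorem findMinMaxPos_spec : Claim_equal_findMinMaxPos := by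
  intro h _
  unfold Spec_findMinMaxPos findMinMaxPos findMinMaxPos_alt
  rw [altGo_false]
  have := loop2_eq_lastAux h 0
  rw [zero_add] at this
  rw [this]
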